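-- pv_equiv track=rewrite | github.com/pombredanne/maiar | maiar_lib/maiar_lib.py | any_startswith_any
-- ===== SOURCE A (Python) =====
-- def any_startswith_any(elements, test_startswith):
--     if not isinstance(elements, (list, tuple)):
--         elements = [elements]
--
--     for e in elements:
--         for t in test_startswith:
--             if e.startswith(t):
--                 return True
--
--     return False
-- ===== SOURCE B (Python) =====
-- def _match(s, live):
--     # live: suffixes of the original prefixes still consistent with the chars consumed so far
--     if "" in live:
--         return True
--     if not s:
--         return False
--     nxt = [t[1:] for t in live if t[0] == s[0]]
--     return _match(s[1:], nxt)
--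
--
-- def any_startswith_any(elements, test_startswith):
--     if not isinstance(elements, (list, tuple)):
--         elements = [elements]
--     return any(_match(e, list(test_startswith)) for e in elements)
-- ===== Notes on version B (the rewrite author's own statement) =====
-- stated objective: alternative
-- what changed: B replaces the nested startswith scan by a single left-to-right walk over each element's characters that filters the set of still-matching prefix suffixes (a materialized trie walk), stopping as soon as a prefix is exhausted or no prefix survives.
import Mathlib
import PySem

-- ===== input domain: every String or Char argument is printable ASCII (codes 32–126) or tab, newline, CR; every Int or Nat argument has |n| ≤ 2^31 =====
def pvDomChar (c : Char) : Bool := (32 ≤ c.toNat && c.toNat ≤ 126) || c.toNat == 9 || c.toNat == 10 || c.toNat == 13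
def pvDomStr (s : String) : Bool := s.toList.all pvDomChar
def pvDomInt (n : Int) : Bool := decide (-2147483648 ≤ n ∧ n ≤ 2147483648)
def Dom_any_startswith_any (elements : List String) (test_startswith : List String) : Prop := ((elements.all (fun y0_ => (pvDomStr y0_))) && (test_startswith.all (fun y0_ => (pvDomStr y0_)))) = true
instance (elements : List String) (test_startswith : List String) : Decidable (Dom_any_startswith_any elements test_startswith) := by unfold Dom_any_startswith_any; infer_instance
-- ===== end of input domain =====

-- B replaces A's nested startswith loops by a per-element character walk that filters the
-- set of still-matching prefix suffixes (alternative decomposition; same worst-case cost).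


-- ===== PORT A =====
-- nested loops with early return `for e in elements: for t in test_startswith: if e.startswith(t): return True`
def any_startswith_any (elements : List String) (test_startswith : List String) : Bool :=
  elements.any (fun e => test_startswith.any (fun t => PySem.Str.startswith e t))

-- ===== PORT B =====
-- `_match(s, live)`: strings as List Char; `t[1:]` = List.tail, `t[0] == s[0]` on nonempty t = (t.head? == some c)
def pvMatch (s : List Char) (live : List (List Char)) : Bool :=
  if live.contains ([] : List Char) then true
  else
    match s with
    | [] => false
    | c :: cs => pvMatch cs ((live.filter (fun t => t.head? == some c)).map List.tail)

def any_startswith_any_alt (elements : List String) (test_startswith : List String) : Bool :=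
  elements.any (fun e => pvMatch e.toList (test_startswith.map String.toList))

-- ===== PRECONDITION & SPEC =====
def Spec_any_startswith_any (elements : List String) (test_startswith : List String) (out : Bool) : Prop := out = any_startswith_any_alt elements test_startswith
instance (elements : List String) (test_startswith : List String) (out : Bool) : Decidable (Spec_any_startswith_any elements test_startswith out) := by unfold Spec_any_startswith_any; infer_instance

-- ===== CLAIM (what is proved, stated in full; the proofs are below) =====
def Claim_equal_any_startswith_any : Prop := ∀ (elements : List String) (test_startswith : List String), Dom_any_startswith_any elements test_startswith → Spec_any_startswith_any elements test_startswith (any_startswith_any elements test_startswith)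

-- ===== LEMMAS AND PROOFS =====

-- one filtering step preserves "some live suffix is a prefix", provided no live suffix is empty
theorem pvMatch_step (c : Char) (cs : List Char) (live : List (List Char))
    (h : live.contains ([] : List Char) = false) :
    live.any (fun t => decide (t <+: c :: cs)) =
      ((live.filter (fun t => t.head? == some c)).map List.tail).any (fun t => decide (t <+: cs)) := by
  induction live with
  | nil => simp
  | cons t rest ih =>
    simp only [List.contains_cons, Bool.or_eq_false_iff, beq_eq_false_iff_ne, ne_comm] at h
    obtain ⟨ht, hrest⟩ := h
    cases t with
    | nil => exact absurd rfl ht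
    | cons d ts =>
      by_cases hd : d = c
      · subst hd
        simp [List.filter_cons, ih hrest]
      · simp [List.filter_cons, List.cons_prefix_cons, hd, ih hrest]

-- pvMatch decides whether some live suffix is a prefix of s
theorem pvMatch_eq (s : List Char) (live : List (List Char)) :
    pvMatch s live = live.any (fun t => decide (t <+: s)) := by
  induction s generalizing live with
  | nil =>
    unfold pvMatch
    by_cases h : live.contains ([] : List Char)
    · simp only [h, if_true]
      symm
      simp only [List.any_eq_true]
      exact ⟨[], by simpa using h, by simp⟩
    · rw [if_neg h]
      symm
      rw [List.any_eq_false]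
      intro t ht
      simp only [decide_eq_true_eq, List.prefix_nil]
      intro hte
      subst hte
      exact h (by simpa using ht)
  | cons c cs ih =>
    unfold pvMatch
    by_cases h : live.contains ([] : List Char)
    · simp only [h, if_true]
      symm
      simp only [List.any_eq_true]
      exact ⟨[], by simpa using h, by simp⟩
    · simp only [h, Bool.false_eq_true, if_false]
      rw [ih, pvMatch_step c cs live (by simpa using h)]

-- ===== VERDICT (by name: the statement is the Claim_ definition above) =====
-- per element, A's inner scan agrees with B's character walk
theorem inner_eq (e : String) (ts : List String) :
    ts.any (fun t => PySem.Str.startswith e t) = pvMatch e.toList (ts.map String.toList) := by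
  rw [pvMatch_eq]
  simp only [List.any_map]
  induction ts with
  | nil => rfl
  | cons t rest ih =>
    simp only [List.any_cons, ih]
    congr 1
    by_cases h : t.toList <+: e.toList
    · simp [PySem.Str.startswith_eq, PySem.Chars.startswith_iff, h]
    · simp only [Function.comp_apply, PySem.Str.startswith_eq]
      rw [decide_eq_false h, Bool.eq_false_iff]
      intro hc
      rw [PySem.Chars.startswith_iff] at hc
      exact h hc

theorem any_startswith_any_spec : Claim_equal_any_startswith_any := by
  intro elements test_startswith _
  unfold Spec_any_startswith_any any_startswith_any any_startswith_any_alt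
  induction elements with
  | nil => rfl
  | cons e rest ih => simp only [List.any_cons, inner_eq]
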